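-- pv_equiv track=rewrite | github.com/sharpsolutionsdev/autoscoreweb | autoscore/dartvoice_v2.py | _fix_vosk
-- ===== SOURCE A (Python) =====
-- _VOSK_CORRECTIONS = {
--     # "four" misheard as:
--     'for': 'four', 'fore': 'four', 'far': 'four', 'fur': 'four',
--     'fall': 'four', 'foe': 'four', 'ford': 'four', 'fort': 'four',
--     'floor': 'four', 'poor': 'four', 'war': 'four',
--     # "zero" misheard as:
--     'the row': 'zero', 'hero': 'zero', 'nero': 'zero',
--     'arrow': 'zero', 'era': 'zero', 'z row': 'zero',
--     'see row': 'zero', 'a row': 'zero',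
-- }
--
-- def _fix_vosk(text):
--     """Apply Vosk misrecognition corrections to raw transcript."""
--     t = text.lower().strip()
--     if t in _VOSK_CORRECTIONS:
--         return _VOSK_CORRECTIONS[t]
--     # Also check if the score portion (after trigger removal) matches
--     for bad, good in _VOSK_CORRECTIONS.items():
--         if t.endswith(' ' + bad):
--             return t[: -len(bad)] + good
--     return t
-- ===== SOURCE B (Python) =====
-- _VOSK_CORRECTIONS = {
--     # "four" misheard as:
--     'for': 'four', 'fore': 'four', 'far': 'four', 'fur': 'four',
--     'fall': 'four', 'foe': 'four', 'ford': 'four', 'fort': 'four',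
--     'floor': 'four', 'poor': 'four', 'war': 'four',
--     # "zero" misheard as:
--     'the row': 'zero', 'hero': 'zero', 'nero': 'zero',
--     'arrow': 'zero', 'era': 'zero', 'z row': 'zero',
--     'see row': 'zero', 'a row': 'zero',
-- }
--
--
-- def _fix_vosk(text):
--     """Apply Vosk misrecognition corrections to raw transcript.
--
--     Instead of scanning the whole correction table for a matching suffix,
--     build the only two possible suffix candidates (last word, last two
--     words) from the text itself and look each up directly.
--     """
--     t = text.lower().strip()
--     good = _VOSK_CORRECTIONS.get(t)
--     if good is not None:
--         return good
--     head, sep, last = t.rpartition(' ')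
--     if not sep:
--         return t
--     good = _VOSK_CORRECTIONS.get(last)
--     if good is not None:
--         return head + ' ' + good
--     head2, sep2, prev = head.rpartition(' ')
--     if sep2:
--         good = _VOSK_CORRECTIONS.get(prev + ' ' + last)
--         if good is not None:
--             return head2 + ' ' + good
--     return t
-- ===== Notes on version B (the rewrite author's own statement) =====
-- stated objective: alternative
-- what changed: Instead of scanning the whole 19-entry correction table testing each key as a suffix, B derives the only two possible suffix candidates from the text itself (last word and last two words, split off with rpartition on a literal space) and looks each up directly in the dict.
import Mathlib
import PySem

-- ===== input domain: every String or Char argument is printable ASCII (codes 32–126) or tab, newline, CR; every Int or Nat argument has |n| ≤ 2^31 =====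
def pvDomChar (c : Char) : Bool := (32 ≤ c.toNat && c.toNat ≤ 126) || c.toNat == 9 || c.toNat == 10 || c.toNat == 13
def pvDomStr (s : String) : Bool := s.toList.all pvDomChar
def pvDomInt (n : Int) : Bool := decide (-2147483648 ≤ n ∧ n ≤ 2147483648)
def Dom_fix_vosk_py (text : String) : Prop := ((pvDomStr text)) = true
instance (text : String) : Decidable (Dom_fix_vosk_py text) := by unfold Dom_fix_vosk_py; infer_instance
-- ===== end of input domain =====

-- B replaces A's scan over the whole correction table (each key tested as a suffix of the text)
-- by direct dict lookups of the only two possible candidates: the last word and the last two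
-- words of the text, split off with rpartition on a literal space.

-- ===== PORT A =====
-- the module-level _VOSK_CORRECTIONS dict literal of A, keys/values as character lists
def voskList : List (List Char × List Char) :=
  [(['f', 'o', 'r'], ['f', 'o', 'u', 'r']),
   (['f', 'o', 'r', 'e'], ['f', 'o', 'u', 'r']),
   (['f', 'a', 'r'], ['f', 'o', 'u', 'r']),
   (['f', 'u', 'r'], ['f', 'o', 'u', 'r']),
   (['f', 'a', 'l', 'l'], ['f', 'o', 'u', 'r']),
   (['f', 'o', 'e'], ['f', 'o', 'u', 'r']),
   (['f', 'o', 'r', 'd'], ['f', 'o', 'u', 'r']),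
   (['f', 'o', 'r', 't'], ['f', 'o', 'u', 'r']),
   (['f', 'l', 'o', 'o', 'r'], ['f', 'o', 'u', 'r']),
   (['p', 'o', 'o', 'r'], ['f', 'o', 'u', 'r']),
   (['w', 'a', 'r'], ['f', 'o', 'u', 'r']),
   (['t', 'h', 'e', ' ', 'r', 'o', 'w'], ['z', 'e', 'r', 'o']),
   (['h', 'e', 'r', 'o'], ['z', 'e', 'r', 'o']),
   (['n', 'e', 'r', 'o'], ['z', 'e', 'r', 'o']),
   (['a', 'r', 'r', 'o', 'w'], ['z', 'e', 'r', 'o']),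
   (['e', 'r', 'a'], ['z', 'e', 'r', 'o']),
   (['z', ' ', 'r', 'o', 'w'], ['z', 'e', 'r', 'o']),
   (['s', 'e', 'e', ' ', 'r', 'o', 'w'], ['z', 'e', 'r', 'o']),
   (['a', ' ', 'r', 'o', 'w'], ['z', 'e', 'r', 'o'])]

def voskCorrections : PySem.Dict (List Char) (List Char) := PySem.Dict.ofList voskList

-- 'for bad, good in _VOSK_CORRECTIONS.items(): if t.endswith(' ' + bad): return t[:-len(bad)] + good'
def fixLoopA (t : List Char) : List (List Char × List Char) → List Char
  | [] => t
  | (bad, good) :: rest =>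
    if PySem.Chars.endswith t (' ' :: bad) then
      PySem.Chars.slice t none (some (-(bad.length : Int))) ++ good
    else fixLoopA t rest

def fix_vosk_py (text : String) : String :=
  let t := PySem.Chars.strip (PySem.Chars.lower text.toList)
  match PySem.Dict.get? voskCorrections t with
  | some good => String.ofList good
  | none => String.ofList (fixLoopA t voskCorrections.items)

-- ===== PORT B =====
-- B's copy of the _VOSK_CORRECTIONS dict literal, written as string pairs
def voskTable : List (String × String) :=
  [("for", "four"), ("fore", "four"), ("far", "four"), ("fur", "four"),
   ("fall", "four"), ("foe", "four"), ("ford", "four"), ("fort", "four"),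
   ("floor", "four"), ("poor", "four"), ("war", "four"),
   ("the row", "zero"), ("hero", "zero"), ("nero", "zero"),
   ("arrow", "zero"), ("era", "zero"), ("z row", "zero"),
   ("see row", "zero"), ("a row", "zero")]

def voskDictB : PySem.Dict (List Char) (List Char) :=
  PySem.Dict.ofList (voskTable.map (fun p => (p.1.toList, p.2.toList)))

-- hand port of s.rpartition(c) for a single-character separator (PySem has no rpartition);
-- exact: split at the LAST occurrence of c, or ('', '', s) when c does not occur in s.
def rpartitionChar (s : List Char) (c : Char) : List Char × List Char × List Char :=
  match s.reverse.span (· != c) with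
  | (_, []) => ([], [], s)
  | (w, _ :: r) => (r.reverse, [c], w.reverse)

-- B's code after the exact-match lookup failed: look up the last word, then the last two words
def bTail (t : List Char) : List Char :=
  match rpartitionChar t ' ' with
  | (_, [], _) => t
  | (head, _, last) =>
    match PySem.Dict.get? voskDictB last with
    | some good => head ++ ' ' :: good
    | none =>
      match rpartitionChar head ' ' with
      | (head2, _ :: _, prev) =>
        match PySem.Dict.get? voskDictB (prev ++ ' ' :: last) with
        | some good => head2 ++ ' ' :: good
        | none => t
      | _ => t

def fix_vosk_py_alt (text : String) : String :=
  let t := PySem.Chars.strip (PySem.Chars.lower text.toList)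
  match PySem.Dict.get? voskDictB t with
  | some good => String.ofList good
  | none => String.ofList (bTail t)

-- ===== PRECONDITION & SPEC =====
def Spec_fix_vosk_py (text : String) (out : String) : Prop := out = fix_vosk_py_alt text
instance (text : String) (out : String) : Decidable (Spec_fix_vosk_py text out) := by unfold Spec_fix_vosk_py; infer_instance

-- ===== CLAIM (what is proved, stated in full; the proofs are below) =====
def Claim_equal_fix_vosk_py : Prop := ∀ (text : String), Dom_fix_vosk_py text → Spec_fix_vosk_py text (fix_vosk_py text)

-- ===== LEMMAS AND PROOFS =====

-- the two renderings of the module-level dict literal denote the same dict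
theorem dictB_eq : voskDictB = voskCorrections := by decide

theorem dropWhile_head_false (p : Char → Bool) (l : List Char) (c : Char) (r : List Char)
    (h : List.dropWhile p l = c :: r) : p c = false := by
  induction l with
  | nil => simp at h
  | cons a l' ih =>
    rw [List.dropWhile_cons] at h
    by_cases hp : p a = true
    · rw [if_pos hp] at h; exact ih h
    · rw [if_neg hp] at h
      cases h
      simpa using hp

theorem prefix_word (u : List Char) : ∀ (w x y : List Char), (' ' ∉ u) → (' ' ∉ w) →
    ((u ++ ' ' :: x) <+: (w ++ ' ' :: y) ↔ u = w ∧ x <+: y) := by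
  induction u with
  | nil =>
    intro w x y _ hw
    cases w with
    | nil => simp
    | cons c w' =>
      simp only [List.nil_append, List.cons_append, List.cons_prefix_cons]
      constructor
      · rintro ⟨rfl, -⟩; exact absurd (List.mem_cons_self) hw
      · rintro ⟨h, -⟩; exact absurd h (by simp)
  | cons a u' ih =>
    intro w x y hu hw
    cases w with
    | nil =>
      simp only [List.cons_append, List.nil_append, List.cons_prefix_cons]
      constructor
      · rintro ⟨rfl, -⟩; exact absurd (List.mem_cons_self) hu
      · rintro ⟨h, -⟩; simp at h
    | cons b w' =>
      simp only [List.cons_append, List.cons_prefix_cons]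
      rw [ih w' x y (fun h => hu (List.mem_cons_of_mem _ h)) (fun h => hw (List.mem_cons_of_mem _ h))]
      constructor
      · rintro ⟨rfl, rfl, h⟩; exact ⟨rfl, h⟩
      · rintro ⟨h, hx⟩; cases h; exact ⟨rfl, rfl, hx⟩

theorem word_ne_prefix (a w : List Char) (hw : ' ' ∉ w) : ¬ ((a ++ [' ']) <+: w) := by
  intro h
  exact hw (h.subset (by simp))

theorem word_append_inj (a b c d : List Char) (ha : ' ' ∉ a) (hc : ' ' ∉ c) :
    (a ++ ' ' :: b = c ++ ' ' :: d) ↔ (a = c ∧ b = d) := by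
  constructor
  · intro h
    have hp : (a ++ ' ' :: b) <+: (c ++ ' ' :: d) := h ▸ List.prefix_refl _
    obtain ⟨rfl, -⟩ := (prefix_word a c b d ha hc).1 hp
    exact ⟨rfl, by simpa using h⟩
  · rintro ⟨rfl, rfl⟩; rfl

theorem endswith_word (pre lw k : List Char) (hlw : ' ' ∉ lw) (hk : ' ' ∉ k) :
    (PySem.Chars.endswith (pre ++ ' ' :: lw) (' ' :: k) = true ↔ k = lw) := by
  rw [PySem.Chars.endswith_iff, ← List.reverse_prefix]
  have h1 : (' ' :: k).reverse = k.reverse ++ ' ' :: ([] : List Char) := by simp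
  have h2 : (pre ++ ' ' :: lw).reverse = lw.reverse ++ ' ' :: pre.reverse := by simp
  rw [h1, h2, prefix_word _ _ _ _ (by simpa using hk) (by simpa using hlw)]
  simp [List.reverse_inj]

theorem endswith_two (pre lw a b : List Char) (hlw : ' ' ∉ lw) (_ha : ' ' ∉ a) (hb : ' ' ∉ b) :
    (PySem.Chars.endswith (pre ++ ' ' :: lw) (' ' :: (a ++ ' ' :: b)) = true ↔
      (b = lw ∧ (a.reverse ++ [' ']) <+: pre.reverse)) := by
  rw [PySem.Chars.endswith_iff, ← List.reverse_prefix]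
  have h1 : (' ' :: (a ++ ' ' :: b)).reverse = b.reverse ++ ' ' :: (a.reverse ++ [' ']) := by simp
  have h2 : (pre ++ ' ' :: lw).reverse = lw.reverse ++ ' ' :: pre.reverse := by simp
  rw [h1, h2, prefix_word _ _ _ _ (by simpa using hb) (by simpa using hlw)]
  constructor
  · rintro ⟨h, hp⟩; exact ⟨by rw [List.reverse_eq_iff] at h; simpa using h, hp⟩
  · rintro ⟨rfl, hp⟩; exact ⟨rfl, hp⟩

theorem endswith_no_space (t k : List Char) (ht : ' ' ∉ t) :
    PySem.Chars.endswith t (' ' :: k) = false := by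
  rw [Bool.eq_false_iff]
  intro h
  exact ht ((PySem.Chars.endswith_iff _ _ |>.1 h).subset (by simp))

theorem fixLoopA_of_no_space (t : List Char) (ht : ' ' ∉ t) :
    ∀ l, fixLoopA t l = t := by
  intro l
  induction l with
  | nil => rfl
  | cons e rest ih =>
    obtain ⟨b, g⟩ := e
    simp [fixLoopA, endswith_no_space t b ht, ih]

theorem voskMk : voskCorrections = PySem.Dict.mk voskList := by decide

theorem fixLoopA_cons (t bad good : List Char) (rest : List (List Char × List Char)) :
    fixLoopA t ((bad, good) :: rest) =
      if PySem.Chars.endswith t (' ' :: bad) then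
        PySem.Chars.slice t none (some (-(bad.length : Int))) ++ good
      else fixLoopA t rest := rfl

theorem recon' (pre lw g : List Char) (n : Nat) (hn : n = lw.length) (hne : lw ≠ []) :
    PySem.Chars.slice (pre ++ ' ' :: lw) none (some (-(n : Int))) ++ g = pre ++ ' ' :: g := by
  subst hn
  have hpos : 0 < lw.length := List.length_pos_iff.2 hne
  rw [PySem.Chars.slice_eq_listSlice, PySem.List.slice_to_neg_natCast (k := lw.length) _ hpos,
      show (pre ++ ' ' :: lw) = (pre ++ [' ']) ++ lw from by simp]
  rw [List.length_append, Nat.add_sub_cancel, List.take_left]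
  simp

theorem getNone (x : List Char) (l : List (List Char × List Char))
    (h : ∀ e ∈ l, e.1 ≠ x) : (PySem.Dict.mk l).get? x = none := by
  induction l with
  | nil => rfl
  | cons e rest ih =>
    obtain ⟨k, v⟩ := e
    rw [PySem.Dict.get?_mk_cons, if_neg (fun hb => h (k, v) List.mem_cons_self (by simpa using hb))]
    exact ih (fun e he => h e (List.mem_cons_of_mem _ he))

theorem master (t pre x : List Char) (ht : t = pre ++ ' ' :: x)
    (l : List (List Char × List Char))
    (hc : ∀ e ∈ l, ((PySem.Chars.endswith t (' ' :: e.1) = true) ↔ (e.1 = x)))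
    (hne : ∀ e ∈ l, e.1 ≠ []) :
    fixLoopA t l =
      (match (PySem.Dict.mk l).get? x with
       | some g => pre ++ ' ' :: g
       | none => t) := by
  induction l with
  | nil => rfl
  | cons e rest ih =>
    obtain ⟨k, g⟩ := e
    rw [fixLoopA_cons, PySem.Dict.get?_mk_cons]
    by_cases hk : k = x
    · rw [if_pos ((hc (k, g) List.mem_cons_self).2 hk), if_pos (by simpa using hk)]
      subst hk
      rw [ht]
      exact recon' pre k g k.length rfl (hne (k, g) List.mem_cons_self)
    · rw [if_neg (fun hb => hk ((hc (k, g) List.mem_cons_self).1 hb)), if_neg (by simpa using hk)]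
      exact ih (fun e he => hc e (List.mem_cons_of_mem _ he)) (fun e he => hne e (List.mem_cons_of_mem _ he))

theorem loop_eq_bTail (t : List Char) : fixLoopA t voskList = bTail t := by
  rcases hsp : t.reverse.span (· != ' ') with ⟨w, rest⟩
  have hspan := hsp
  rw [List.span_eq_takeWhile_dropWhile, Prod.mk.injEq] at hspan
  obtain ⟨hwT, hrD⟩ := hspan
  have hw : ' ' ∉ w := by
    rw [← hwT]; intro h
    have := List.mem_takeWhile_imp h
    simp at this
  have htr : t.reverse = w ++ rest := by
    rw [← hwT, ← hrD, List.takeWhile_append_dropWhile]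
  unfold bTail rpartitionChar
  rw [dictB_eq, hsp]
  cases rest with
  | nil =>
    have hts : ' ' ∉ t := by
      intro h
      have h2 : ' ' ∈ t.reverse := List.mem_reverse.2 h
      rw [htr] at h2
      simp only [List.append_nil] at h2
      exact hw h2
    simpa using fixLoopA_of_no_space t hts voskList
  | cons c r2 =>
    have hc : c = ' ' := by simpa using dropWhile_head_false _ _ _ _ hrD
    subst hc
    have ht : t = r2.reverse ++ ' ' :: w.reverse := by
      have h := congrArg List.reverse htr
      simp at h
      exact h
    have hlw : ' ' ∉ w.reverse := by simpa using hw
    dsimp only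
    have e0 : (PySem.Chars.endswith t (' ' :: (['f', 'o', 'r'] : List Char)) = true) ↔ ((['f', 'o', 'r'] : List Char) = w.reverse) := by
      rw [ht]; exact endswith_word _ _ _ hlw (by decide)
    have e1 : (PySem.Chars.endswith t (' ' :: (['f', 'o', 'r', 'e'] : List Char)) = true) ↔ ((['f', 'o', 'r', 'e'] : List Char) = w.reverse) := by
      rw [ht]; exact endswith_word _ _ _ hlw (by decide)
    have e2 : (PySem.Chars.endswith t (' ' :: (['f', 'a', 'r'] : List Char)) = true) ↔ ((['f', 'a', 'r'] : List Char) = w.reverse) := by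
      rw [ht]; exact endswith_word _ _ _ hlw (by decide)
    have e3 : (PySem.Chars.endswith t (' ' :: (['f', 'u', 'r'] : List Char)) = true) ↔ ((['f', 'u', 'r'] : List Char) = w.reverse) := by
      rw [ht]; exact endswith_word _ _ _ hlw (by decide)
    have e4 : (PySem.Chars.endswith t (' ' :: (['f', 'a', 'l', 'l'] : List Char)) = true) ↔ ((['f', 'a', 'l', 'l'] : List Char) = w.reverse) := by
      rw [ht]; exact endswith_word _ _ _ hlw (by decide)
    have e5 : (PySem.Chars.endswith t (' ' :: (['f', 'o', 'e'] : List Char)) = true) ↔ ((['f', 'o', 'e'] : List Char) = w.reverse) := by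
      rw [ht]; exact endswith_word _ _ _ hlw (by decide)
    have e6 : (PySem.Chars.endswith t (' ' :: (['f', 'o', 'r', 'd'] : List Char)) = true) ↔ ((['f', 'o', 'r', 'd'] : List Char) = w.reverse) := by
      rw [ht]; exact endswith_word _ _ _ hlw (by decide)
    have e7 : (PySem.Chars.endswith t (' ' :: (['f', 'o', 'r', 't'] : List Char)) = true) ↔ ((['f', 'o', 'r', 't'] : List Char) = w.reverse) := by
      rw [ht]; exact endswith_word _ _ _ hlw (by decide)
    have e8 : (PySem.Chars.endswith t (' ' :: (['f', 'l', 'o', 'o', 'r'] : List Char)) = true) ↔ ((['f', 'l', 'o', 'o', 'r'] : List Char) = w.reverse) := by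
      rw [ht]; exact endswith_word _ _ _ hlw (by decide)
    have e9 : (PySem.Chars.endswith t (' ' :: (['p', 'o', 'o', 'r'] : List Char)) = true) ↔ ((['p', 'o', 'o', 'r'] : List Char) = w.reverse) := by
      rw [ht]; exact endswith_word _ _ _ hlw (by decide)
    have e10 : (PySem.Chars.endswith t (' ' :: (['w', 'a', 'r'] : List Char)) = true) ↔ ((['w', 'a', 'r'] : List Char) = w.reverse) := by
      rw [ht]; exact endswith_word _ _ _ hlw (by decide)
    have e11 : (PySem.Chars.endswith t (' ' :: (['h', 'e', 'r', 'o'] : List Char)) = true) ↔ ((['h', 'e', 'r', 'o'] : List Char) = w.reverse) := by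
      rw [ht]; exact endswith_word _ _ _ hlw (by decide)
    have e12 : (PySem.Chars.endswith t (' ' :: (['n', 'e', 'r', 'o'] : List Char)) = true) ↔ ((['n', 'e', 'r', 'o'] : List Char) = w.reverse) := by
      rw [ht]; exact endswith_word _ _ _ hlw (by decide)
    have e13 : (PySem.Chars.endswith t (' ' :: (['a', 'r', 'r', 'o', 'w'] : List Char)) = true) ↔ ((['a', 'r', 'r', 'o', 'w'] : List Char) = w.reverse) := by
      rw [ht]; exact endswith_word _ _ _ hlw (by decide)
    have e14 : (PySem.Chars.endswith t (' ' :: (['e', 'r', 'a'] : List Char)) = true) ↔ ((['e', 'r', 'a'] : List Char) = w.reverse) := by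
      rw [ht]; exact endswith_word _ _ _ hlw (by decide)
    have n0 : ¬((['t', 'h', 'e', ' ', 'r', 'o', 'w'] : List Char) = w.reverse) := fun h => hlw (h ▸ (by decide : ' ' ∈ (['t', 'h', 'e', ' ', 'r', 'o', 'w'] : List Char)))
    have n1 : ¬((['z', ' ', 'r', 'o', 'w'] : List Char) = w.reverse) := fun h => hlw (h ▸ (by decide : ' ' ∈ (['z', ' ', 'r', 'o', 'w'] : List Char)))
    have n2 : ¬((['s', 'e', 'e', ' ', 'r', 'o', 'w'] : List Char) = w.reverse) := fun h => hlw (h ▸ (by decide : ' ' ∈ (['s', 'e', 'e', ' ', 'r', 'o', 'w'] : List Char)))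
    have n3 : ¬((['a', ' ', 'r', 'o', 'w'] : List Char) = w.reverse) := fun h => hlw (h ▸ (by decide : ' ' ∈ (['a', ' ', 'r', 'o', 'w'] : List Char)))
    have f0 : (PySem.Chars.endswith t (' ' :: (['t', 'h', 'e', ' ', 'r', 'o', 'w'] : List Char)) = true) ↔ (((['r', 'o', 'w'] : List Char) = w.reverse) ∧ ((['e', 'h', 't'] : List Char) ++ [' ']) <+: r2) := by
      rw [ht, show (['t', 'h', 'e', ' ', 'r', 'o', 'w'] : List Char) = ['t', 'h', 'e'] ++ ' ' :: ['r', 'o', 'w'] from by decide,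
          endswith_two _ _ _ _ hlw (by decide) (by decide), List.reverse_reverse,
          show (['t', 'h', 'e'] : List Char).reverse = (['e', 'h', 't'] : List Char) from by decide]
    have f1 : (PySem.Chars.endswith t (' ' :: (['z', ' ', 'r', 'o', 'w'] : List Char)) = true) ↔ (((['r', 'o', 'w'] : List Char) = w.reverse) ∧ ((['z'] : List Char) ++ [' ']) <+: r2) := by
      rw [ht, show (['z', ' ', 'r', 'o', 'w'] : List Char) = ['z'] ++ ' ' :: ['r', 'o', 'w'] from by decide,
          endswith_two _ _ _ _ hlw (by decide) (by decide), List.reverse_reverse,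
          show (['z'] : List Char).reverse = (['z'] : List Char) from by decide]
    have f2 : (PySem.Chars.endswith t (' ' :: (['s', 'e', 'e', ' ', 'r', 'o', 'w'] : List Char)) = true) ↔ (((['r', 'o', 'w'] : List Char) = w.reverse) ∧ ((['e', 'e', 's'] : List Char) ++ [' ']) <+: r2) := by
      rw [ht, show (['s', 'e', 'e', ' ', 'r', 'o', 'w'] : List Char) = ['s', 'e', 'e'] ++ ' ' :: ['r', 'o', 'w'] from by decide,
          endswith_two _ _ _ _ hlw (by decide) (by decide), List.reverse_reverse,
          show (['s', 'e', 'e'] : List Char).reverse = (['e', 'e', 's'] : List Char) from by decide]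
    have f3 : (PySem.Chars.endswith t (' ' :: (['a', ' ', 'r', 'o', 'w'] : List Char)) = true) ↔ (((['r', 'o', 'w'] : List Char) = w.reverse) ∧ ((['a'] : List Char) ++ [' ']) <+: r2) := by
      rw [ht, show (['a', ' ', 'r', 'o', 'w'] : List Char) = ['a'] ++ ' ' :: ['r', 'o', 'w'] from by decide,
          endswith_two _ _ _ _ hlw (by decide) (by decide), List.reverse_reverse,
          show (['a'] : List Char).reverse = (['a'] : List Char) from by decide]
    rw [List.reverse_reverse]
    rcases hsp2 : r2.span (· != ' ') with ⟨w2, rest2⟩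
    have hspan2 := hsp2
    rw [List.span_eq_takeWhile_dropWhile, Prod.mk.injEq] at hspan2
    obtain ⟨hw2T, hr2D⟩ := hspan2
    have hw2 : ' ' ∉ w2 := by
      rw [← hw2T]; intro h
      have := List.mem_takeWhile_imp h
      simp at this
    have hr2 : r2 = w2 ++ rest2 := by
      rw [← hw2T, ← hr2D, List.takeWhile_append_dropWhile]
    cases rest2 with
    | nil =>
      dsimp only
      have hr2s : ' ' ∉ r2 := by rw [hr2, List.append_nil]; exact hw2
      have np : ∀ a : List Char, ¬((a ++ [' ']) <+: r2) := fun a => word_ne_prefix a r2 hr2s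
      have hcn : ∀ e ∈ voskList, ((PySem.Chars.endswith t (' ' :: e.1) = true) ↔ (e.1 = w.reverse)) := by
        intro e he
        simp only [voskList, List.mem_cons, List.not_mem_nil, or_false] at he
        rcases he with rfl | rfl | rfl | rfl | rfl | rfl | rfl | rfl | rfl | rfl | rfl | rfl | rfl | rfl | rfl | rfl | rfl | rfl | rfl
        · exact e0
        · exact e1
        · exact e2
        · exact e3
        · exact e4
        · exact e5
        · exact e6
        · exact e7
        · exact e8
        · exact e9
        · exact e10
        · exact ⟨fun hx => absurd (f0.1 hx).2 (np _), fun hx => absurd hx n0⟩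
        · exact e11
        · exact e12
        · exact e13
        · exact e14
        · exact ⟨fun hx => absurd (f1.1 hx).2 (np _), fun hx => absurd hx n1⟩
        · exact ⟨fun hx => absurd (f2.1 hx).2 (np _), fun hx => absurd hx n2⟩
        · exact ⟨fun hx => absurd (f3.1 hx).2 (np _), fun hx => absurd hx n3⟩
      rw [master t r2.reverse w.reverse ht voskList hcn (by decide), voskMk]
    | cons c2 r3 =>
      have hc2 : c2 = ' ' := by simpa using dropWhile_head_false _ _ _ _ hr2D
      subst hc2
      dsimp only
      have ht3 : t = r3.reverse ++ ' ' :: (w2.reverse ++ ' ' :: w.reverse) := by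
        rw [ht, hr2]
        simp
      have hp0 : (((['e', 'h', 't'] : List Char) ++ [' ']) <+: r2) ↔ ((['t', 'h', 'e'] : List Char) = w2.reverse) := by
        rw [hr2, show ((['e', 'h', 't'] : List Char) ++ [' ']) = (['e', 'h', 't'] ++ ' ' :: ([] : List Char)) from rfl,
            prefix_word _ _ _ _ (by decide) hw2,
            show (['e', 'h', 't'] : List Char) = (['t', 'h', 'e'] : List Char).reverse from by decide, List.reverse_eq_iff]
        simp
      have hp1 : (((['z'] : List Char) ++ [' ']) <+: r2) ↔ ((['z'] : List Char) = w2.reverse) := by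
        rw [hr2, show ((['z'] : List Char) ++ [' ']) = (['z'] ++ ' ' :: ([] : List Char)) from rfl,
            prefix_word _ _ _ _ (by decide) hw2,
            show (['z'] : List Char) = (['z'] : List Char).reverse from by decide, List.reverse_eq_iff]
        simp
      have hp2 : (((['e', 'e', 's'] : List Char) ++ [' ']) <+: r2) ↔ ((['s', 'e', 'e'] : List Char) = w2.reverse) := by
        rw [hr2, show ((['e', 'e', 's'] : List Char) ++ [' ']) = (['e', 'e', 's'] ++ ' ' :: ([] : List Char)) from rfl,
            prefix_word _ _ _ _ (by decide) hw2,
            show (['e', 'e', 's'] : List Char) = (['s', 'e', 'e'] : List Char).reverse from by decide, List.reverse_eq_iff]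
        simp
      have hp3 : (((['a'] : List Char) ++ [' ']) <+: r2) ↔ ((['a'] : List Char) = w2.reverse) := by
        rw [hr2, show ((['a'] : List Char) ++ [' ']) = (['a'] ++ ' ' :: ([] : List Char)) from rfl,
            prefix_word _ _ _ _ (by decide) hw2,
            show (['a'] : List Char) = (['a'] : List Char).reverse from by decide, List.reverse_eq_iff]
        simp
      have g0 : ((['t', 'h', 'e', ' ', 'r', 'o', 'w'] : List Char) = w2.reverse ++ ' ' :: w.reverse) ↔ (((['r', 'o', 'w'] : List Char) = w.reverse) ∧ ((['t', 'h', 'e'] : List Char) = w2.reverse)) := by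
        rw [show (['t', 'h', 'e', ' ', 'r', 'o', 'w'] : List Char) = ['t', 'h', 'e'] ++ ' ' :: ['r', 'o', 'w'] from by decide,
            word_append_inj _ _ _ _ (by decide) (by simpa using hw2)]
        exact and_comm
      have g1 : ((['z', ' ', 'r', 'o', 'w'] : List Char) = w2.reverse ++ ' ' :: w.reverse) ↔ (((['r', 'o', 'w'] : List Char) = w.reverse) ∧ ((['z'] : List Char) = w2.reverse)) := by
        rw [show (['z', ' ', 'r', 'o', 'w'] : List Char) = ['z'] ++ ' ' :: ['r', 'o', 'w'] from by decide,
            word_append_inj _ _ _ _ (by decide) (by simpa using hw2)]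
        exact and_comm
      have g2 : ((['s', 'e', 'e', ' ', 'r', 'o', 'w'] : List Char) = w2.reverse ++ ' ' :: w.reverse) ↔ (((['r', 'o', 'w'] : List Char) = w.reverse) ∧ ((['s', 'e', 'e'] : List Char) = w2.reverse)) := by
        rw [show (['s', 'e', 'e', ' ', 'r', 'o', 'w'] : List Char) = ['s', 'e', 'e'] ++ ' ' :: ['r', 'o', 'w'] from by decide,
            word_append_inj _ _ _ _ (by decide) (by simpa using hw2)]
        exact and_comm
      have g3 : ((['a', ' ', 'r', 'o', 'w'] : List Char) = w2.reverse ++ ' ' :: w.reverse) ↔ (((['r', 'o', 'w'] : List Char) = w.reverse) ∧ ((['a'] : List Char) = w2.reverse)) := by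
        rw [show (['a', ' ', 'r', 'o', 'w'] : List Char) = ['a'] ++ ' ' :: ['r', 'o', 'w'] from by decide,
            word_append_inj _ _ _ _ (by decide) (by simpa using hw2)]
        exact and_comm
      have m0 : ¬((['f', 'o', 'r'] : List Char) = w2.reverse ++ ' ' :: w.reverse) := fun h => (by decide : ' ' ∉ (['f', 'o', 'r'] : List Char)) (h.symm ▸ (by simp : ' ' ∈ w2.reverse ++ ' ' :: w.reverse))
      have m1 : ¬((['f', 'o', 'r', 'e'] : List Char) = w2.reverse ++ ' ' :: w.reverse) := fun h => (by decide : ' ' ∉ (['f', 'o', 'r', 'e'] : List Char)) (h.symm ▸ (by simp : ' ' ∈ w2.reverse ++ ' ' :: w.reverse))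
      have m2 : ¬((['f', 'a', 'r'] : List Char) = w2.reverse ++ ' ' :: w.reverse) := fun h => (by decide : ' ' ∉ (['f', 'a', 'r'] : List Char)) (h.symm ▸ (by simp : ' ' ∈ w2.reverse ++ ' ' :: w.reverse))
      have m3 : ¬((['f', 'u', 'r'] : List Char) = w2.reverse ++ ' ' :: w.reverse) := fun h => (by decide : ' ' ∉ (['f', 'u', 'r'] : List Char)) (h.symm ▸ (by simp : ' ' ∈ w2.reverse ++ ' ' :: w.reverse))
      have m4 : ¬((['f', 'a', 'l', 'l'] : List Char) = w2.reverse ++ ' ' :: w.reverse) := fun h => (by decide : ' ' ∉ (['f', 'a', 'l', 'l'] : List Char)) (h.symm ▸ (by simp : ' ' ∈ w2.reverse ++ ' ' :: w.reverse))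
      have m5 : ¬((['f', 'o', 'e'] : List Char) = w2.reverse ++ ' ' :: w.reverse) := fun h => (by decide : ' ' ∉ (['f', 'o', 'e'] : List Char)) (h.symm ▸ (by simp : ' ' ∈ w2.reverse ++ ' ' :: w.reverse))
      have m6 : ¬((['f', 'o', 'r', 'd'] : List Char) = w2.reverse ++ ' ' :: w.reverse) := fun h => (by decide : ' ' ∉ (['f', 'o', 'r', 'd'] : List Char)) (h.symm ▸ (by simp : ' ' ∈ w2.reverse ++ ' ' :: w.reverse))
      have m7 : ¬((['f', 'o', 'r', 't'] : List Char) = w2.reverse ++ ' ' :: w.reverse) := fun h => (by decide : ' ' ∉ (['f', 'o', 'r', 't'] : List Char)) (h.symm ▸ (by simp : ' ' ∈ w2.reverse ++ ' ' :: w.reverse))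
      have m8 : ¬((['f', 'l', 'o', 'o', 'r'] : List Char) = w2.reverse ++ ' ' :: w.reverse) := fun h => (by decide : ' ' ∉ (['f', 'l', 'o', 'o', 'r'] : List Char)) (h.symm ▸ (by simp : ' ' ∈ w2.reverse ++ ' ' :: w.reverse))
      have m9 : ¬((['p', 'o', 'o', 'r'] : List Char) = w2.reverse ++ ' ' :: w.reverse) := fun h => (by decide : ' ' ∉ (['p', 'o', 'o', 'r'] : List Char)) (h.symm ▸ (by simp : ' ' ∈ w2.reverse ++ ' ' :: w.reverse))
      have m10 : ¬((['w', 'a', 'r'] : List Char) = w2.reverse ++ ' ' :: w.reverse) := fun h => (by decide : ' ' ∉ (['w', 'a', 'r'] : List Char)) (h.symm ▸ (by simp : ' ' ∈ w2.reverse ++ ' ' :: w.reverse))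
      have m11 : ¬((['h', 'e', 'r', 'o'] : List Char) = w2.reverse ++ ' ' :: w.reverse) := fun h => (by decide : ' ' ∉ (['h', 'e', 'r', 'o'] : List Char)) (h.symm ▸ (by simp : ' ' ∈ w2.reverse ++ ' ' :: w.reverse))
      have m12 : ¬((['n', 'e', 'r', 'o'] : List Char) = w2.reverse ++ ' ' :: w.reverse) := fun h => (by decide : ' ' ∉ (['n', 'e', 'r', 'o'] : List Char)) (h.symm ▸ (by simp : ' ' ∈ w2.reverse ++ ' ' :: w.reverse))
      have m13 : ¬((['a', 'r', 'r', 'o', 'w'] : List Char) = w2.reverse ++ ' ' :: w.reverse) := fun h => (by decide : ' ' ∉ (['a', 'r', 'r', 'o', 'w'] : List Char)) (h.symm ▸ (by simp : ' ' ∈ w2.reverse ++ ' ' :: w.reverse))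
      have m14 : ¬((['e', 'r', 'a'] : List Char) = w2.reverse ++ ' ' :: w.reverse) := fun h => (by decide : ' ' ∉ (['e', 'r', 'a'] : List Char)) (h.symm ▸ (by simp : ' ' ∈ w2.reverse ++ ' ' :: w.reverse))
      by_cases hrow : (['r','o','w'] : List Char) = w.reverse
      · have k0 : ¬((['f', 'o', 'r'] : List Char) = w.reverse) := fun h => (by decide : (['f', 'o', 'r'] : List Char) ≠ (['r','o','w'] : List Char)) (h.trans hrow.symm)
        have k1 : ¬((['f', 'o', 'r', 'e'] : List Char) = w.reverse) := fun h => (by decide : (['f', 'o', 'r', 'e'] : List Char) ≠ (['r','o','w'] : List Char)) (h.trans hrow.symm)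
        have k2 : ¬((['f', 'a', 'r'] : List Char) = w.reverse) := fun h => (by decide : (['f', 'a', 'r'] : List Char) ≠ (['r','o','w'] : List Char)) (h.trans hrow.symm)
        have k3 : ¬((['f', 'u', 'r'] : List Char) = w.reverse) := fun h => (by decide : (['f', 'u', 'r'] : List Char) ≠ (['r','o','w'] : List Char)) (h.trans hrow.symm)
        have k4 : ¬((['f', 'a', 'l', 'l'] : List Char) = w.reverse) := fun h => (by decide : (['f', 'a', 'l', 'l'] : List Char) ≠ (['r','o','w'] : List Char)) (h.trans hrow.symm)
        have k5 : ¬((['f', 'o', 'e'] : List Char) = w.reverse) := fun h => (by decide : (['f', 'o', 'e'] : List Char) ≠ (['r','o','w'] : List Char)) (h.trans hrow.symm)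
        have k6 : ¬((['f', 'o', 'r', 'd'] : List Char) = w.reverse) := fun h => (by decide : (['f', 'o', 'r', 'd'] : List Char) ≠ (['r','o','w'] : List Char)) (h.trans hrow.symm)
        have k7 : ¬((['f', 'o', 'r', 't'] : List Char) = w.reverse) := fun h => (by decide : (['f', 'o', 'r', 't'] : List Char) ≠ (['r','o','w'] : List Char)) (h.trans hrow.symm)
        have k8 : ¬((['f', 'l', 'o', 'o', 'r'] : List Char) = w.reverse) := fun h => (by decide : (['f', 'l', 'o', 'o', 'r'] : List Char) ≠ (['r','o','w'] : List Char)) (h.trans hrow.symm)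
        have k9 : ¬((['p', 'o', 'o', 'r'] : List Char) = w.reverse) := fun h => (by decide : (['p', 'o', 'o', 'r'] : List Char) ≠ (['r','o','w'] : List Char)) (h.trans hrow.symm)
        have k10 : ¬((['w', 'a', 'r'] : List Char) = w.reverse) := fun h => (by decide : (['w', 'a', 'r'] : List Char) ≠ (['r','o','w'] : List Char)) (h.trans hrow.symm)
        have k11 : ¬((['h', 'e', 'r', 'o'] : List Char) = w.reverse) := fun h => (by decide : (['h', 'e', 'r', 'o'] : List Char) ≠ (['r','o','w'] : List Char)) (h.trans hrow.symm)
        have k12 : ¬((['n', 'e', 'r', 'o'] : List Char) = w.reverse) := fun h => (by decide : (['n', 'e', 'r', 'o'] : List Char) ≠ (['r','o','w'] : List Char)) (h.trans hrow.symm)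
        have k13 : ¬((['a', 'r', 'r', 'o', 'w'] : List Char) = w.reverse) := fun h => (by decide : (['a', 'r', 'r', 'o', 'w'] : List Char) ≠ (['r','o','w'] : List Char)) (h.trans hrow.symm)
        have k14 : ¬((['e', 'r', 'a'] : List Char) = w.reverse) := fun h => (by decide : (['e', 'r', 'a'] : List Char) ≠ (['r','o','w'] : List Char)) (h.trans hrow.symm)
        have hc1 : ∀ e ∈ voskList, ((PySem.Chars.endswith t (' ' :: e.1) = true) ↔ (e.1 = w2.reverse ++ ' ' :: w.reverse)) := by
          intro e he
          simp only [voskList, List.mem_cons, List.not_mem_nil, or_false] at he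
          rcases he with rfl | rfl | rfl | rfl | rfl | rfl | rfl | rfl | rfl | rfl | rfl | rfl | rfl | rfl | rfl | rfl | rfl | rfl | rfl
          · exact ⟨fun hx => absurd (e0.1 hx) k0, fun hx => absurd hx m0⟩
          · exact ⟨fun hx => absurd (e1.1 hx) k1, fun hx => absurd hx m1⟩
          · exact ⟨fun hx => absurd (e2.1 hx) k2, fun hx => absurd hx m2⟩
          · exact ⟨fun hx => absurd (e3.1 hx) k3, fun hx => absurd hx m3⟩
          · exact ⟨fun hx => absurd (e4.1 hx) k4, fun hx => absurd hx m4⟩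
          · exact ⟨fun hx => absurd (e5.1 hx) k5, fun hx => absurd hx m5⟩
          · exact ⟨fun hx => absurd (e6.1 hx) k6, fun hx => absurd hx m6⟩
          · exact ⟨fun hx => absurd (e7.1 hx) k7, fun hx => absurd hx m7⟩
          · exact ⟨fun hx => absurd (e8.1 hx) k8, fun hx => absurd hx m8⟩
          · exact ⟨fun hx => absurd (e9.1 hx) k9, fun hx => absurd hx m9⟩
          · exact ⟨fun hx => absurd (e10.1 hx) k10, fun hx => absurd hx m10⟩
          · exact (f0.trans (and_congr_right (fun _ => hp0))).trans g0.symm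
          · exact ⟨fun hx => absurd (e11.1 hx) k11, fun hx => absurd hx m11⟩
          · exact ⟨fun hx => absurd (e12.1 hx) k12, fun hx => absurd hx m12⟩
          · exact ⟨fun hx => absurd (e13.1 hx) k13, fun hx => absurd hx m13⟩
          · exact ⟨fun hx => absurd (e14.1 hx) k14, fun hx => absurd hx m14⟩
          · exact (f1.trans (and_congr_right (fun _ => hp1))).trans g1.symm
          · exact (f2.trans (and_congr_right (fun _ => hp2))).trans g2.symm
          · exact (f3.trans (and_congr_right (fun _ => hp3))).trans g3.symm
        rw [master t r3.reverse (w2.reverse ++ ' ' :: w.reverse) ht3 voskList hc1 (by decide), voskMk,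
            show (PySem.Dict.mk voskList).get? w.reverse = none from by rw [← hrow]; decide]
      · have hc0 : ∀ e ∈ voskList, ((PySem.Chars.endswith t (' ' :: e.1) = true) ↔ (e.1 = w.reverse)) := by
          intro e he
          simp only [voskList, List.mem_cons, List.not_mem_nil, or_false] at he
          rcases he with rfl | rfl | rfl | rfl | rfl | rfl | rfl | rfl | rfl | rfl | rfl | rfl | rfl | rfl | rfl | rfl | rfl | rfl | rfl
          · exact e0
          · exact e1
          · exact e2
          · exact e3
          · exact e4
          · exact e5
          · exact e6
          · exact e7
          · exact e8
          · exact e9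
          · exact e10
          · exact ⟨fun hx => absurd (f0.1 hx).1 hrow, fun hx => absurd hx n0⟩
          · exact e11
          · exact e12
          · exact e13
          · exact e14
          · exact ⟨fun hx => absurd (f1.1 hx).1 hrow, fun hx => absurd hx n1⟩
          · exact ⟨fun hx => absurd (f2.1 hx).1 hrow, fun hx => absurd hx n2⟩
          · exact ⟨fun hx => absurd (f3.1 hx).1 hrow, fun hx => absurd hx n3⟩
        have hnone1 : ∀ e ∈ voskList, e.1 ≠ w2.reverse ++ ' ' :: w.reverse := by
          intro e he
          simp only [voskList, List.mem_cons, List.not_mem_nil, or_false] at he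
          rcases he with rfl | rfl | rfl | rfl | rfl | rfl | rfl | rfl | rfl | rfl | rfl | rfl | rfl | rfl | rfl | rfl | rfl | rfl | rfl
          · exact m0
          · exact m1
          · exact m2
          · exact m3
          · exact m4
          · exact m5
          · exact m6
          · exact m7
          · exact m8
          · exact m9
          · exact m10
          · exact fun h => hrow ((g0.1 h).1)
          · exact m11
          · exact m12
          · exact m13
          · exact m14
          · exact fun h => hrow ((g1.1 h).1)
          · exact fun h => hrow ((g2.1 h).1)
          · exact fun h => hrow ((g3.1 h).1)
        rw [master t r2.reverse w.reverse ht voskList hc0 (by decide), voskMk,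
            getNone (w2.reverse ++ ' ' :: w.reverse) voskList hnone1]

-- ===== VERDICT (by name: the statement is the Claim_ definition above) =====
theorem fix_vosk_py_spec : Claim_equal_fix_vosk_py := by
  intro text _
  unfold Spec_fix_vosk_py fix_vosk_py fix_vosk_py_alt
  rw [dictB_eq]
  cases hg : PySem.Dict.get? voskCorrections (PySem.Chars.strip (PySem.Chars.lower text.toList)) with
  | some g => simp [hg]
  | none =>
    simp only [hg]
    rw [show voskCorrections.items = voskList from rfl, loop_eq_bTail]
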